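-- pv_equiv track=rewrite | github.com/Iggymojungle/Advent-of-code-2022 | Day 8/main.py | get_left_right
-- ===== SOURCE A (Python) =====
-- def get_left_right(data):
--     total = 0
--     trees = []
--     for line_num, line in enumerate(data):
--         for pos, tree in enumerate(line):
--             if all([tree > line[pos+i] for i in range(1, len(line)-pos)]) or all([tree > line[i] for i in range(pos-1, -1, -1)]):
--                 total += 1
--                 trees.append([line_num, pos])
--     return total, trees
-- ===== SOURCE B (Python) =====
-- def get_left_right(data):
--     # One O(n) running-max scan per direction instead of A's O(n^2) all()-rescans.
--     def scan(chars):
--         flags = []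
--         m = None
--         for ch in chars:
--             flags.append(m is None or ch > m)
--             if m is None or ch > m:
--                 m = ch
--         return flags
--     total = 0
--     trees = []
--     for line_num, line in enumerate(data):
--         left_vis = scan(line)
--         right_vis = scan(line[::-1])[::-1]
--         for pos, (l, r) in enumerate(zip(left_vis, right_vis)):
--             if l or r:
--                 total += 1
--                 trees.append([line_num, pos])
--     return total, trees
-- ===== Notes on version B (the rewrite author's own statement) =====
-- stated objective: faster
-- what changed: Replaces A's per-tree all() rescans of the whole row by one left-to-right and one right-to-left running-maximum scan per row, reading each flag from the precomputed visibility lists.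
import Mathlib
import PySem

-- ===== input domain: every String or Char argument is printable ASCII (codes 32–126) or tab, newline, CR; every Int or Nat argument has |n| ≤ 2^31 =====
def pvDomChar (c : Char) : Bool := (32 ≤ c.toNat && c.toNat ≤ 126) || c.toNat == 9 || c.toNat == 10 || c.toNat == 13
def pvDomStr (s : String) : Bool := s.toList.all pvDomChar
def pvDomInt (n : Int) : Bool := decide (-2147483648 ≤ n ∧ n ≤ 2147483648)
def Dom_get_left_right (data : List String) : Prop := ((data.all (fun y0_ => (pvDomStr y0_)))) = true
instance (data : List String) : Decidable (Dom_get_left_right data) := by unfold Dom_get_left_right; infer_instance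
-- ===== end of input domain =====

-- B replaces A's per-tree O(n) all() rescans by two O(n) running-maximum scans per row (objective: faster, asymptotic).

-- ===== PORT A =====
-- literal transliteration of A; the indices pos+i and i fed to pyGetD are always in range, so the default ' ' is never read
def get_left_right (data : List String) : Int × List (List Int) :=
  (PySem.List.enumerate data 0).foldl (fun acc p =>
    let line := p.2.toList
    (PySem.List.enumerate line 0).foldl (fun acc2 q =>
      if ((PySem.List.pyRange 1 (PySem.List.len line - q.1) 1).all
            (fun i => decide (PySem.List.pyGetD line (q.1 + i) ' ' < q.2))
          || (PySem.List.pyRange (q.1 - 1) (-1) (-1)).all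
            (fun i => decide (PySem.List.pyGetD line i ' ' < q.2)))
      then (acc2.1 + 1, acc2.2 ++ [[p.1, q.1]]) else acc2) acc)
    ((0 : Int), ([] : List (List Int)))

-- ===== PORT B =====
-- 'm is None or ch > m'
def pvVisB (m : Option Char) (ch : Char) : Bool :=
  match m with
  | none => true
  | some v => decide (v < ch)

-- B's scan helper: running max m, flag per char
def pvScan (chars : List Char) : List Bool :=
  (chars.foldl (fun (st : List Bool × Option Char) ch =>
      (st.1 ++ [pvVisB st.2 ch], if pvVisB st.2 ch then some ch else st.2))
    (([] : List Bool), (none : Option Char))).1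

-- line[::-1] on a string is the reversed character sequence
def get_left_right_alt (data : List String) : Int × List (List Int) :=
  (PySem.List.enumerate data 0).foldl (fun acc p =>
    let line := p.2.toList
    let leftVis := pvScan line
    let rightVis := (pvScan line.reverse).reverse
    (PySem.List.enumerate (leftVis.zip rightVis) 0).foldl (fun acc2 q =>
      if q.2.1 || q.2.2 then (acc2.1 + 1, acc2.2 ++ [[p.1, q.1]]) else acc2) acc)
    ((0 : Int), ([] : List (List Int)))

-- ===== PRECONDITION & SPEC =====
def Spec_get_left_right (data : List String) (out : Int × List (List Int)) : Prop := out = get_left_right_alt data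
instance (data : List String) (out : Int × List (List Int)) : Decidable (Spec_get_left_right data out) := by unfold Spec_get_left_right; infer_instance

-- ===== CLAIM (what is proved, stated in full; the proofs are below) =====
def Claim_equal_get_left_right : Prop := ∀ (data : List String), Dom_get_left_right data → Spec_get_left_right data (get_left_right data)

-- ===== LEMMAS AND PROOFS =====

-- B-proof helpers: a structural recursion equal to pvScan's fold, and the running maximum
def pvStepM (m : Option Char) (ch : Char) : Option Char := if pvVisB m ch then some ch else m

def pvScanRec (m : Option Char) : List Char → List Bool
  | [] => []
  | c :: cs => pvVisB m c :: pvScanRec (pvStepM m c) cs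

def pvRun (m : Option Char) (cs : List Char) : Option Char := cs.foldl pvStepM m

theorem pvScan_fold (cs : List Char) : ∀ (fl : List Bool) (m : Option Char),
    (cs.foldl (fun (st : List Bool × Option Char) ch =>
      (st.1 ++ [pvVisB st.2 ch], if pvVisB st.2 ch then some ch else st.2)) (fl, m)).1
    = fl ++ pvScanRec m cs := by
  induction cs with
  | nil => intro fl m; simp [pvScanRec]
  | cons c cs ih =>
      intro fl m
      simp only [List.foldl_cons, pvScanRec]
      rw [ih]
      simp [pvStepM, List.append_assoc]

theorem pvScan_eq (cs : List Char) : pvScan cs = pvScanRec none cs := by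
  simpa using pvScan_fold cs [] none

theorem length_pvScanRec (cs : List Char) : ∀ m, (pvScanRec m cs).length = cs.length := by
  induction cs with
  | nil => intro m; rfl
  | cons c cs ih => intro m; simp [pvScanRec, ih]

theorem pvVisB_run (p : List Char) : ∀ (m : Option Char) (ch : Char),
    pvVisB (pvRun m p) ch = (pvVisB m ch && p.all (fun c => decide (c < ch))) := by
  induction p with
  | nil => intro m ch; simp [pvRun]
  | cons c p ih =>
      intro m ch
      have hstep : pvRun m (c :: p) = pvRun (pvStepM m c) p := rfl
      rw [hstep, ih]
      have hone : pvVisB (pvStepM m c) ch = (pvVisB m ch && decide (c < ch)) := by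
        cases m with
        | none => simp [pvStepM, pvVisB]
        | some v =>
            by_cases h : v < c
            · simp only [pvStepM, pvVisB, h, decide_true, if_true]
              by_cases h2 : c < ch
              · have : v < ch := lt_trans h h2
                simp [h2, this]
              · have : ¬ (v < ch ∧ c < ch) := fun ⟨_, hc⟩ => h2 hc
                simp [h2]
            · simp only [pvStepM, pvVisB, h, decide_false]
              by_cases h2 : v < ch
              · have : c < ch := lt_of_le_of_lt (le_of_not_gt h) h2
                simp [h2, this]
              · simp [h2]
      rw [List.all_cons, hone, Bool.and_assoc]

theorem pvScanRec_getElem (cs : List Char) : ∀ (m : Option Char) (k : Nat) (h : k < cs.length),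
    (pvScanRec m cs)[k]'(by rw [length_pvScanRec]; exact h)
      = pvVisB (pvRun m (cs.take k)) (cs[k]'h) := by
  induction cs with
  | nil => intro m k h; simp at h
  | cons c cs ih =>
      intro m k h
      cases k with
      | zero => simp [pvScanRec, pvRun]
      | succ k =>
          simp only [pvScanRec, List.getElem_cons_succ, List.take_succ_cons]
          rw [ih (pvStepM m c) k (by simpa using h)]
          rfl

theorem pvScan_getElem (cs : List Char) (k : Nat) (h : k < cs.length) :
    (pvScan cs)[k]'(by rw [pvScan_eq, length_pvScanRec]; exact h)
      = (cs.take k).all (fun c => decide (c < cs[k]'h)) := by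
  have := pvScanRec_getElem cs none k h
  simp only [pvScan_eq]
  rw [this, pvVisB_run]
  simp [pvVisB]

theorem length_pvScan (cs : List Char) : (pvScan cs).length = cs.length := by
  rw [pvScan_eq, length_pvScanRec]

-- right-visibility flags: the reversed scan of the reversed line reads the suffix
theorem pvScan_rev_getElem (cs : List Char) (k : Nat) (h : k < cs.length) :
    ((pvScan cs.reverse).reverse)[k]'(by simp [length_pvScan]; exact h)
      = (cs.drop (k + 1)).all (fun c => decide (c < cs[k]'h)) := by
  have hlen : (pvScan cs.reverse).length = cs.length := by simp [length_pvScan]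
  rw [List.getElem_reverse]
  have hk : (pvScan cs.reverse).length - 1 - k < cs.reverse.length := by
    simp [hlen]; omega
  rw [pvScan_getElem cs.reverse _ hk]
  have h1 : cs.reverse[(pvScan cs.reverse).length - 1 - k]'hk = cs[k]'h := by
    rw [List.getElem_reverse]
    congr 1
    simp [hlen]; omega
  rw [h1]
  have h2 : cs.reverse.take ((pvScan cs.reverse).length - 1 - k)
      = (cs.drop (k + 1)).reverse := by
    rw [List.take_reverse]
    congr 1
    simp [hlen]; omega
  rw [h2, List.all_reverse]

-- A's leftward countdown scan is 'all of the prefix'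
theorem pyLeft_eq (cs : List Char) : ∀ (k : Nat), k ≤ cs.length → ∀ (tree : Char),
    (PySem.List.pyRange ((k : Int) - 1) (-1) (-1)).all
      (fun i => decide (PySem.List.pyGetD cs i ' ' < tree))
    = (cs.take k).all (fun c => decide (c < tree)) := by
  intro k
  induction k with
  | zero =>
      intro _ tree
      rw [PySem.List.pyRange_neg_one_eq_nil (by norm_num)]
      simp
  | succ k ih =>
      intro hk tree
      have hcons : PySem.List.pyRange (((k : Nat) + 1 : Int) - 1) (-1) (-1)
          = (k : Int) :: PySem.List.pyRange ((k : Int) - 1) (-1) (-1) := by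
        have := PySem.List.pyRange_neg_one_cons (a := ((k : Nat) + 1 : Int) - 1) (b := -1)
          (by omega)
        simpa using this
      push_cast
      rw [hcons, List.all_cons, ih (by omega) tree]
      have hklt : k < cs.length := by omega
      have hget : PySem.List.pyGetD cs (k : Int) ' ' = cs[k]'hklt := by
        rw [PySem.List.pyGetD_natCast]
        exact List.getD_eq_getElem cs ' ' hklt
      rw [hget, List.take_add_one, List.all_append]
      have : (cs[k]?.toList).all (fun c => decide (c < tree)) = decide (cs[k]'hklt < tree) := by
        rw [List.getElem?_eq_getElem hklt]
        simp
      rw [this, Bool.and_comm]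

-- A's rightward range scan is 'all of the suffix'
theorem pyRight_eq (cs : List Char) (k : Nat) (h : k < cs.length) (tree : Char) :
    (PySem.List.pyRange 1 (PySem.List.len cs - (k : Int)) 1).all
      (fun i => decide (PySem.List.pyGetD cs ((k : Int) + i) ' ' < tree))
    = (cs.drop (k + 1)).all (fun c => decide (c < tree)) := by
  have hmap : (PySem.List.pyRange 1 (PySem.List.len cs - (k : Int)) 1).map
        (fun i => PySem.List.pyGetD cs ((k : Int) + i) ' ')
      = cs.drop (k + 1) := by
    have hdrop := PySem.List.map_pyGetD_pyRange (xs := cs) (a := ((k : Nat) + 1 : Int))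
      (d := ' ') (by positivity)
    have h2 : PySem.List.pyRange ((k : Nat) + 1 : Int) (PySem.List.len cs) 1
        = (PySem.List.pyRange 1 (PySem.List.len cs - (k : Int)) 1).map (fun i => (k : Int) + i) := by
      rw [PySem.List.pyRange_one, PySem.List.pyRange_one, List.map_map]
      have : (PySem.List.len cs - ((k : Nat) + 1 : Int)).toNat
          = (PySem.List.len cs - (k : Int) - 1).toNat := by
        simp [PySem.List.len_eq]; omega
      rw [this]
      apply List.map_congr_left
      intro x _
      simp [Function.comp]; omega
    rw [h2, List.map_map] at hdrop
    have h3 : ((k : Nat) + 1 : Int).toNat = k + 1 := by omega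
    rw [h3] at hdrop
    rw [← hdrop]
    rfl
  rw [← hmap, List.all_map]
  rfl

-- the zipped flag list that B enumerates IS the enumerated line mapped through the two suffix/prefix conditions
theorem zipvis_eq (cs : List Char) :
    PySem.List.enumerate ((pvScan cs).zip ((pvScan cs.reverse).reverse)) 0
      = (PySem.List.enumerate cs 0).map (fun q =>
          (q.1, ((cs.take q.1.toNat).all (fun c => decide (c < q.2)),
                 (cs.drop (q.1.toNat + 1)).all (fun c => decide (c < q.2))))) := by
  have hl : (pvScan cs).length = cs.length := length_pvScan cs
  have hr : ((pvScan cs.reverse).reverse).length = cs.length := by simp [length_pvScan]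
  apply List.ext_getElem
  · simp [PySem.List.length_enumerate, hl, hr]
  · intro k h1 h2
    have hk : k < cs.length := by
      simp [PySem.List.length_enumerate, hl, hr] at h1; omega
    have hzip : k < ((pvScan cs).zip ((pvScan cs.reverse).reverse)).length := by
      simp [hl, hr]; exact hk
    rw [PySem.List.getElem_enumerate, List.getElem_map, PySem.List.getElem_enumerate,
        List.getElem_zip]
    have h3 : ((0 : Int) + (k : Int)).toNat = k := by omega
    simp only [h3]
    simp only [Prod.mk.injEq]
    exact ⟨trivial, pvScan_getElem cs k hk, pvScan_rev_getElem cs k hk⟩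

-- per-line: A's quadratic inner fold equals B's flag-list inner fold
theorem inner_eq (ln : Int) (cs : List Char) (acc : Int × List (List Int)) :
    (PySem.List.enumerate cs 0).foldl (fun acc2 q =>
        if ((PySem.List.pyRange 1 (PySem.List.len cs - q.1) 1).all
              (fun i => decide (PySem.List.pyGetD cs (q.1 + i) ' ' < q.2))
            || (PySem.List.pyRange (q.1 - 1) (-1) (-1)).all
              (fun i => decide (PySem.List.pyGetD cs i ' ' < q.2)))
        then (acc2.1 + 1, acc2.2 ++ [[ln, q.1]]) else acc2) acc
    = (PySem.List.enumerate ((pvScan cs).zip ((pvScan cs.reverse).reverse)) 0).foldl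
        (fun acc2 q => if q.2.1 || q.2.2 then (acc2.1 + 1, acc2.2 ++ [[ln, q.1]]) else acc2) acc := by
  rw [zipvis_eq, List.foldl_map]
  apply PySem.List.foldl_congr_mem
  intro a q hq
  rcases (PySem.List.mem_enumerate_iff _ _ _).1 hq with ⟨k, hk, rfl⟩
  simp only [zero_add]
  have htn : ((k : Int)).toNat = k := by omega
  rw [htn, pyRight_eq cs k hk, pyLeft_eq cs k (le_of_lt hk), Bool.or_comm]

theorem get_left_right_spec : Claim_equal_get_left_right := by
  intro data _
  unfold Spec_get_left_right get_left_right get_left_right_alt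
  apply PySem.List.foldl_congr_mem
  intro acc p _
  exact inner_eq p.1 p.2.toList acc
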